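-- pv_equiv track=rewrite | github.com/bestkasscn/CTF-cryptology-encryption-and-decryption-system | classic/single/rot.py | rot18_encrypt
-- ===== SOURCE A (Python) =====
-- def rot5_encrypt(plaintext: str) -> str:
--     ciphertext = ""
--     for c in plaintext:
--         if c.isdigit():
--             new_digit = (int(c) + 5) % 10
--             ciphertext += str(new_digit)
--         else:
--             ciphertext += c
--     return ciphertext
--
-- def rot13_encrypt(plaintext: str) -> str:
--     ciphertext = ""
--     for c in plaintext:
--         if c.isalpha():
--             if c.isupper():
--                 new_ascii = (ord(c) - 65 + 13) % 26 + 65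
--             else:
--                 new_ascii = (ord(c) - 97 + 13) % 26 + 97
--             ciphertext += chr(new_ascii)
--         else:
--             ciphertext += c
--     return ciphertext
--
-- def rot18_encrypt(plaintext: str) -> str:
--     ciphertext = ""
--     for c in plaintext:
--         if c.isalpha():
--             if c.isupper():
--                 new_ascii = (ord(c) - 65 + 18) % 26 + 65
--             else:
--                 new_ascii = (ord(c) - 97 + 18) % 26 + 97
--             ciphertext += chr(new_ascii)
--         else:
--             ciphertext += c
--     return rot5_encrypt(rot13_encrypt(plaintext))
-- ===== SOURCE B (Python) =====
-- _SRC = "ABCDEFGHIJKLMNOPQRSTUVWXYZabcdefghijklmnopqrstuvwxyz0123456789"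
-- _DST = "NOPQRSTUVWXYZABCDEFGHIJKLMnopqrstuvwxyzabcdefghijklm5678901234"
-- _ROT18 = str.maketrans(_SRC, _DST)
--
-- def rot18_encrypt(plaintext: str) -> str:
--     return plaintext.translate(_ROT18)
-- ===== Notes on version B (the rewrite author's own statement) =====
-- stated objective: faster
-- what changed: Replaced the dead shift-18 loop plus the two-pass rot5(rot13(...)) helper composition by a single precomputed translation table (str.maketrans with shift 13 for letters and +5 mod 10 for digits) applied in one str.translate pass.
import Mathlib
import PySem

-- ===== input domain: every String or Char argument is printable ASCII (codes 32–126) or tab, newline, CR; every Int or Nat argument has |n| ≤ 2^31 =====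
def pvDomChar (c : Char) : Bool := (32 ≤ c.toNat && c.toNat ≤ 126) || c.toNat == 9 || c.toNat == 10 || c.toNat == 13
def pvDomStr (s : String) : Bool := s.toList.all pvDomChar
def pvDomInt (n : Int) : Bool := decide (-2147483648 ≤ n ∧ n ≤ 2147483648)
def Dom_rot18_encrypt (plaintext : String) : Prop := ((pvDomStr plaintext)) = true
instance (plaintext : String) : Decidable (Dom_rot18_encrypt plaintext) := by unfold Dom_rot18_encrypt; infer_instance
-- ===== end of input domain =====

-- B replaces A's dead shift-18 loop and the rot5(rot13(...)) two-pass helper composition by one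
-- precomputed translation table applied in a single pass (idiomatic str.maketrans/translate).

-- ===== PORT A =====
-- c.isdigit() / c.isalpha() / c.isupper() for a single char: exact on the ASCII domain Dom_.
def pvIsDigit (c : Char) : Bool := 48 ≤ c.toNat && c.toNat ≤ 57
def pvIsAlpha (c : Char) : Bool := (65 ≤ c.toNat && c.toNat ≤ 90) || (97 ≤ c.toNat && c.toNat ≤ 122)
def pvIsUpper (c : Char) : Bool := 65 ≤ c.toNat && c.toNat ≤ 90

-- body of rot5_encrypt's branch: digit → (int(c)+5)%10 as a char, else c unchanged
def pvRot5Char (c : Char) : Char :=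
  if pvIsDigit c then Char.ofNat ((c.toNat - 48 + 5) % 10 + 48) else c

def rot5_encrypt_A (plaintext : String) : String :=
  String.ofList (plaintext.toList.foldl (fun acc c => acc ++ [pvRot5Char c]) [])

-- body of rot13_encrypt's branch: letter → shift 13 within its case, else c unchanged
def pvRot13Char (c : Char) : Char :=
  if pvIsAlpha c then
    if pvIsUpper c then Char.ofNat ((c.toNat - 65 + 13) % 26 + 65)
    else Char.ofNat ((c.toNat - 97 + 13) % 26 + 97)
  else c

def rot13_encrypt_A (plaintext : String) : String :=
  String.ofList (plaintext.toList.foldl (fun acc c => acc ++ [pvRot13Char c]) [])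

-- the shift-18 loop body (dead code in A, transcribed all the same)
def pvRot18DeadChar (c : Char) : Char :=
  if pvIsAlpha c then
    if pvIsUpper c then Char.ofNat ((c.toNat - 65 + 18) % 26 + 65)
    else Char.ofNat ((c.toNat - 97 + 18) % 26 + 97)
  else c

def rot18_encrypt (plaintext : String) : String :=
  -- A builds 'ciphertext' with shift 18 and then discards it
  let _ciphertext := plaintext.toList.foldl (fun acc c => acc ++ [pvRot18DeadChar c]) ([] : List Char)
  rot5_encrypt_A (rot13_encrypt_A plaintext)

-- ===== PORT B =====
def pvRotSrc : List Char := "ABCDEFGHIJKLMNOPQRSTUVWXYZabcdefghijklmnopqrstuvwxyz0123456789".toList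
def pvRotDst : List Char := "NOPQRSTUVWXYZABCDEFGHIJKLMnopqrstuvwxyzabcdefghijklm5678901234".toList

-- str.maketrans(_SRC, _DST): a char→char mapping, built once
def pvRot18Table : PySem.Dict Char Char := PySem.Dict.ofList (pvRotSrc.zip pvRotDst)

-- plaintext.translate(_ROT18): chars absent from the table pass through unchanged
def rot18_encrypt_alt (plaintext : String) : String :=
  String.ofList (plaintext.toList.map (fun c => pvRot18Table.getD c c))

-- ===== PRECONDITION & SPEC =====
def Spec_rot18_encrypt (plaintext : String) (out : String) : Prop := out = rot18_encrypt_alt plaintext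
instance (plaintext : String) (out : String) : Decidable (Spec_rot18_encrypt plaintext out) := by unfold Spec_rot18_encrypt; infer_instance

-- ===== CLAIM (what is proved, stated in full; the proofs are below) =====
def Claim_equal_rot18_encrypt : Prop := ∀ (plaintext : String), Dom_rot18_encrypt plaintext → Spec_rot18_encrypt plaintext (rot18_encrypt plaintext)

-- ===== LEMMAS AND PROOFS =====

-- pointwise agreement on every ASCII char (checked exhaustively on codes 0..127)
set_option maxRecDepth 16384 in
lemma pvChar_agree (c : Char) (h : c.toNat ≤ 126) :
    pvRot5Char (pvRot13Char c) = pvRot18Table.getD c c := by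
  have hall : ∀ n : Fin 128,
      pvRot5Char (pvRot13Char (Char.ofNat n.val)) =
        pvRot18Table.getD (Char.ofNat n.val) (Char.ofNat n.val) := by decide
  have hc : Char.ofNat c.toNat = c := Char.ofNat_toNat c
  have := hall ⟨c.toNat, by omega⟩
  simpa [hc] using this

set_option maxRecDepth 16384 in
theorem rot18_encrypt_spec : Claim_equal_rot18_encrypt := by
  intro s hdom
  unfold Spec_rot18_encrypt rot18_encrypt rot18_encrypt_alt rot5_encrypt_A rot13_encrypt_A
  simp only [PySem.List.foldl_append_singleton_eq_map, List.nil_append, String.toList_ofList,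
    List.map_map]
  congr 1
  apply List.map_congr_left
  intro c hc
  have hdc : pvDomChar c = true := by
    have := List.all_eq_true.mp hdom c hc
    exact this
  have hle : c.toNat ≤ 126 := by
    unfold pvDomChar at hdc
    simp only [Bool.or_eq_true, Bool.and_eq_true, decide_eq_true_eq, beq_iff_eq] at hdc
    omega
  exact pvChar_agree c hle
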